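-- pv_equiv track=rewrite | github.com/ggy0151/BIZ_AI_PYTHON | hw_1_bizAI 1st.py | decryption_fn
-- ===== SOURCE A (Python) =====
-- def decryption_fn(text):
--     result2 = []
--     for j in text:
--         b = str(ord(j))
--         c =[]
--         for t in b:
--             c.append(t)
--         length = len(c)
--         while length < 5 :
--             c.insert(0,"0")
--             length += 1
--         c.insert(len(c), c[0])
--         c.pop(0)
--         codeNum2 = chr(int(''.join(c)))
--         result2.append(codeNum2)
--
--     denc_text = ''.join(result2)
--     pass
--
--     return denc_text
-- ===== SOURCE B (Python) =====
-- def decryption_fn(text):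
--     # Closed-form left rotation of the (5-padded) digit string of each ordinal.
--     out = []
--     for j in text:
--         n = ord(j)
--         d = max(len(str(n)), 5)
--         p = 10 ** (d - 1)
--         out.append(chr((n % p) * 10 + n // p))
--     return ''.join(out)
-- ===== Notes on version B (the rewrite author's own statement) =====
-- stated objective: simpler
-- what changed: Replaces A's digit-list construction, while-loop zero padding and insert/pop rotation per character with one closed-form arithmetic rotation (n%p)*10 + n//p where p = 10**(max(len(str(n)),5)-1).
import Mathlib
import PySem

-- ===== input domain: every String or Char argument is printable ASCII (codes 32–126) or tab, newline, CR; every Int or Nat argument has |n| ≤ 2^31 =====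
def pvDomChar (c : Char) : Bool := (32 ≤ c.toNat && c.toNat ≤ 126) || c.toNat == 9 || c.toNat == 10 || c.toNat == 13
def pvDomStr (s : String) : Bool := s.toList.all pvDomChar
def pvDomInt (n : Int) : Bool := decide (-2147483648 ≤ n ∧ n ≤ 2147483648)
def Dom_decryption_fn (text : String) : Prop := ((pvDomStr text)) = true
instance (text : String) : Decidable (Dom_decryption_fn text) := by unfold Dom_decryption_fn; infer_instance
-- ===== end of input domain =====

-- B replaces A's per-character digit-list build / while-loop padding / insert-pop rotation
-- with one closed-form arithmetic rotation per character (objective: simpler).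

-- ===== PORT A =====
-- the 'while length < 5' padding loop of A, as a countdown over the 5 - length
-- remaining iterations (structural recursion; same prepends in the same order)
def pvPadAux : Nat → List Char → List Char
  | 0, c => c
  | k + 1, c => pvPadAux k ('0' :: c)
def pvPadA (c : List Char) (length : Nat) : List Char := pvPadAux (5 - length) c

-- A's loop body for one character j, taking n = ord(j).
-- chr / ord are ported by hand: ord(j) = j.toNat, chr(m) = Char.ofNat m — exact for the
-- code points reachable on Dom (0 ≤ m < 0x110000); int(''.join(c)) = PySem.Int.ofChars?,
-- which is always 'some' here since c is a nonempty digit list (getD 0 is never taken).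
def pvBodyA (n : Nat) : Char :=
  let b := PySem.Int.toChars (n : Int)           -- b = str(ord(j))
  let c := b.foldl (fun c t => c ++ [t]) []      -- for t in b: c.append(t)
  let c := pvPadA c c.length                     -- while length < 5: c.insert(0,"0")
  let c := c ++ [c.headD '0']                    -- c.insert(len(c), c[0])  (c nonempty)
  let c := c.drop 1                              -- c.pop(0)
  Char.ofNat ((PySem.Int.ofChars? c).getD 0).toNat  -- chr(int(''.join(c)))

def decryption_fn (text : String) : String :=
  let result2 := text.toList.foldl (fun result2 j => result2 ++ [pvBodyA j.toNat]) []
  String.ofList result2                          -- ''.join(result2)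

-- ===== PORT B =====
-- B's loop body for one character, n = ord(j)
def pvBodyB (n : Nat) : Char :=
  let d := max (PySem.Int.toChars (n : Int)).length 5   -- d = max(len(str(n)), 5)
  let p : Int := 10 ^ (d - 1)                           -- p = 10 ** (d - 1)
  Char.ofNat ((PySem.Int.mod (n : Int) p) * 10 + PySem.Int.floordiv (n : Int) p).toNat

def decryption_fn_alt (text : String) : String :=
  String.ofList (text.toList.map (fun j => pvBodyB j.toNat))

-- ===== PRECONDITION & SPEC =====
def Spec_decryption_fn (text : String) (out : String) : Prop := out = decryption_fn_alt text
instance (text : String) (out : String) : Decidable (Spec_decryption_fn text out) := by unfold Spec_decryption_fn; infer_instance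

-- ===== CLAIM (what is proved, stated in full; the proofs are below) =====
def Claim_equal_decryption_fn : Prop := ∀ (text : String), Dom_decryption_fn text → Spec_decryption_fn text (decryption_fn text)

-- ===== LEMMAS AND PROOFS =====
set_option maxHeartbeats 4000000 in
lemma pvBody_eq (n : Nat) (h9 : 9 ≤ n) (h126 : n ≤ 126) : pvBodyA n = pvBodyB n := by
  interval_cases n <;> decide

-- ===== VERDICT (by name: the statement is the Claim_ definition above) =====
set_option maxHeartbeats 4000000 in
theorem decryption_fn_spec : Claim_equal_decryption_fn := by
  intro text hdom
  unfold Spec_decryption_fn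
  simp only [decryption_fn, decryption_fn_alt]
  rw [PySem.List.foldl_append_singleton_eq_map (fun j => pvBodyA j.toNat) text.toList []]
  rw [List.nil_append]
  congr 1
  apply List.map_congr_left
  intro c hc
  have hd : pvDomChar c = true := List.all_eq_true.mp hdom c hc
  have hb : ((32 ≤ c.toNat ∧ c.toNat ≤ 126 ∨ c.toNat = 9) ∨ c.toNat = 10) ∨ c.toNat = 13 := by
    simpa [pvDomChar] using hd
  exact pvBody_eq c.toNat (by omega) (by omega)
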